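-- pv_equiv track=rewrite | github.com/DarkShield666/ForInterview | Algorithm/is_continue_hash.py | is_continue_hash
-- ===== SOURCE A (Python) =====
-- def is_continue_hash(numbers):
--     cards = {}
--     for num in numbers:
--         if num == 0:
--             continue
--         if num in cards.keys():
--             return False
--         else:
--             cards[num] = 1
--     return True if max(cards.keys()) - min(cards.keys()) <= 4 else False
-- ===== SOURCE B (Python) =====
-- def is_continue_hash(numbers):
--     nonzero = sorted(n for n in numbers if n != 0)
--     for prev, cur in zip(nonzero, nonzero[1:]):
--         if prev == cur:
--             return False
--     return max(nonzero) - min(nonzero) <= 4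
-- ===== Notes on version B (the rewrite author's own statement) =====
-- stated objective: simpler
-- what changed: B sorts the nonzero cards once and detects duplicates by comparing adjacent elements of the sorted run, instead of A's hash-dict membership loop; the span check uses max/min of the same list.
import Mathlib
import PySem

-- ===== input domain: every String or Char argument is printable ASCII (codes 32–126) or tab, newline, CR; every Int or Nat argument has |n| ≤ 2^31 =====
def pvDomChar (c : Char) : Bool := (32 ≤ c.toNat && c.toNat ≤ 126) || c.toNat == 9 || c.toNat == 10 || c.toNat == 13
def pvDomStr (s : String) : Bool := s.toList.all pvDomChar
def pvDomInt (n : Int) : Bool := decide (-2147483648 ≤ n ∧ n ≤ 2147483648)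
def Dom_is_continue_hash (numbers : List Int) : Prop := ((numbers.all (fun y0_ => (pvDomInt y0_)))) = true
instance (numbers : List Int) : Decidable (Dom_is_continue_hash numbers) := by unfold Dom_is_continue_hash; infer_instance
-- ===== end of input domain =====

-- B sorts the nonzero cards once and finds duplicates by an adjacent scan instead of A's dict membership loop; same return value.

-- ===== PORT A =====
-- the for-loop of A: none = the early `return False` on a duplicate nonzero card
def aLoop : List Int → PySem.Dict Int Int → Option (PySem.Dict Int Int)
  | [], cards => some cards
  | n :: rest, cards =>
    if n == 0 then aLoop rest cards
    else if cards.contains n then none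
    else aLoop rest (cards.insert n 1)

def is_continue_hash (numbers : List Int) : Bool :=
  match aLoop numbers PySem.Dict.empty with
  | none => false
  | some cards =>
    -- max(cards.keys()) - min(cards.keys()): Python raises ValueError on an empty dict; Pre_ excludes that
    match PySem.List.max? cards.keys (fun x => x), PySem.List.min? cards.keys (fun x => x) with
    | some mx, some mn => if mx - mn ≤ 4 then true else false
    | _, _ => false

-- ===== PORT B =====
-- the zip(nonzero, nonzero[1:]) loop of B: true iff some adjacent pair is equal
def bAdjDup : List Int → Bool
  | x :: y :: t => if x == y then true else bAdjDup (y :: t)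
  | _ => false

def is_continue_hash_alt (numbers : List Int) : Bool :=
  let nonzero := PySem.List.sorted (numbers.filter (fun n => !(n == 0))) (fun x => x)
  if bAdjDup nonzero then false
  else
    -- max(nonzero) - min(nonzero): Python raises ValueError on an empty list; Pre_ excludes that
    match PySem.List.max? nonzero (fun x => x) with
    | none => false
    | some mx =>
      match PySem.List.min? nonzero (fun x => x) with
      | none => false
      | some mn => decide (mx - mn ≤ 4)

-- ===== PRECONDITION & SPEC =====
-- Pre_ excludes exactly the inputs with no nonzero element, where both Pythons raise ValueError (max() of an empty sequence).
def Pre_is_continue_hash (numbers : List Int) : Prop := ∃ x ∈ numbers, x ≠ 0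
instance (numbers : List Int) : Decidable (Pre_is_continue_hash numbers) := by unfold Pre_is_continue_hash; infer_instance
def pvWitness_is_continue_hash : List Int := [1, 2, 3]

def Spec_is_continue_hash (numbers : List Int) (out : Bool) : Prop := out = is_continue_hash_alt numbers
instance (numbers : List Int) (out : Bool) : Decidable (Spec_is_continue_hash numbers out) := by unfold Spec_is_continue_hash; infer_instance

-- ===== CLAIM (what is proved, stated in full; the proofs are below) =====
def Claim_equal_is_continue_hash : Prop := ∀ (numbers : List Int), Dom_is_continue_hash numbers → Pre_is_continue_hash numbers → Spec_is_continue_hash numbers (is_continue_hash numbers)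

-- ===== LEMMAS AND PROOFS =====

-- A's loop, characterised: the surviving dict's keys are the nonzero cards in order, provided they are distinct; otherwise the loop returns False (none).
lemma aLoop_keys (ns : List Int) : ∀ (cards : PySem.Dict Int Int), cards.keys.Nodup →
    (aLoop ns cards).map PySem.Dict.keys =
      if (cards.keys ++ ns.filter (fun n => !(n == 0))).Nodup
      then some (cards.keys ++ ns.filter (fun n => !(n == 0))) else none := by
  induction ns with
  | nil => intro cards hnd; simp [aLoop, hnd]
  | cons n rest ih =>
    intro cards hnd
    by_cases h0 : n = 0
    · simp [aLoop, h0, ih cards hnd]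
    · have hb : (n == 0) = false := by simp [h0]
      have hfil : (n :: rest).filter (fun n => !(n == 0)) = n :: rest.filter (fun n => !(n == 0)) := by
        simp [hb]
      by_cases hc : cards.contains n
      · have hmem : n ∈ cards.keys := (PySem.Dict.contains_iff_mem_keys cards n).mp hc
        have hnot : ¬ (cards.keys ++ (n :: rest).filter (fun n => !(n == 0))).Nodup := by
          rw [hfil]
          intro hnodup
          exact (List.nodup_append.mp hnodup).2.2 n hmem n (by simp) rfl
        rw [hfil] at hnot
        simp [aLoop, hb, hc, hnot]
      · have hcf : cards.contains n = false := by simpa using hc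
        have hnm : n ∉ cards.keys := fun hm => hc ((PySem.Dict.contains_iff_mem_keys cards n).mpr hm)
        have hkeys : (cards.insert n 1).keys = cards.keys ++ [n] :=
          PySem.Dict.keys_insert_of_not_contains cards 1 hcf
        have hnd' : (cards.insert n 1).keys.Nodup := by
          rw [hkeys]; exact List.Nodup.append hnd (by simp) (by simpa using hnm)
        have hih := ih (cards.insert n 1) hnd'
        rw [hkeys, List.append_assoc, List.singleton_append] at hih
        simp only [aLoop, hb, hcf, hfil]
        exact hih

-- B's adjacent scan on a ≤-sorted list detects exactly non-distinctness.
lemma bAdjDup_false_iff (s : List Int) (hp : s.Pairwise (· ≤ ·)) : bAdjDup s = false ↔ s.Nodup := by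
  induction s with
  | nil => simp [bAdjDup]
  | cons x t iht =>
    cases t with
    | nil => simp [bAdjDup]
    | cons y u =>
      have hp' : (y :: u).Pairwise (· ≤ ·) := hp.tail
      by_cases hxy : x = y
      · subst hxy
        simp [bAdjDup]
      · have hxley : x ≤ y := (List.pairwise_cons.mp hp).1 y (by simp)
        have hxlt : x < y := lt_of_le_of_ne hxley hxy
        have hxnot : x ∉ y :: u := by
          intro hm
          rcases List.mem_cons.mp hm with h | h
          · exact hxy h
          · have : y ≤ x := (List.pairwise_cons.mp hp').1 x h
            exact absurd (lt_of_lt_of_le hxlt this) (lt_irrefl x)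
        have : bAdjDup (x :: y :: u) = bAdjDup (y :: u) := by simp [bAdjDup, hxy]
        rw [this, iht hp']
        constructor
        · intro h; exact List.Nodup.cons hxnot h
        · intro h; exact h.of_cons

-- max?/min? with the identity key return THE extremal value, so they agree on any two permuted lists.
lemma max?_eq_of_perm (xs ys : List Int) (h : xs.Perm ys) :
    PySem.List.max? xs (fun x => x) = PySem.List.max? ys (fun x => x) := by
  cases hx : PySem.List.max? xs (fun x => x) with
  | none =>
    have : xs = [] := (PySem.List.max?_eq_none_iff xs _).mp hx
    subst this
    have : ys = [] := h.nil_eq.symm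
    simp [this, PySem.List.max?]
  | some m =>
    cases hy : PySem.List.max? ys (fun x => x) with
    | none =>
      have : ys = [] := (PySem.List.max?_eq_none_iff ys _).mp hy
      subst this
      have : xs = [] := h.eq_nil
      simp [this, PySem.List.max?] at hx
    | some m' =>
      have hm : m ∈ xs := PySem.List.max?_mem hx
      have hm' : m' ∈ ys := PySem.List.max?_mem hy
      have h1 : m ≤ m' := PySem.List.max?_isMax hy m (h.mem_iff.mp hm)
      have h2 : m' ≤ m := PySem.List.max?_isMax hx m' (h.mem_iff.mpr hm')
      rw [le_antisymm h1 h2]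

lemma min?_eq_of_perm (xs ys : List Int) (h : xs.Perm ys) :
    PySem.List.min? xs (fun x => x) = PySem.List.min? ys (fun x => x) := by
  cases hx : PySem.List.min? xs (fun x => x) with
  | none =>
    have : xs = [] := (PySem.List.min?_eq_none_iff xs _).mp hx
    subst this
    have : ys = [] := h.nil_eq.symm
    simp [this, PySem.List.min?]
  | some m =>
    cases hy : PySem.List.min? ys (fun x => x) with
    | none =>
      have : ys = [] := (PySem.List.min?_eq_none_iff ys _).mp hy
      subst this
      have : xs = [] := h.eq_nil
      simp [this, PySem.List.min?] at hx
    | some m' =>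
      have hm : m ∈ xs := PySem.List.min?_mem hx
      have hm' : m' ∈ ys := PySem.List.min?_mem hy
      have h1 : m' ≤ m := PySem.List.min?_isMin hy m (h.mem_iff.mp hm)
      have h2 : m ≤ m' := PySem.List.min?_isMin hx m' (h.mem_iff.mpr hm')
      rw [le_antisymm h2 h1]

-- ===== VERDICT (by name: the statement is the Claim_ definition above) =====
theorem is_continue_hash_spec : Claim_equal_is_continue_hash := by
  intro numbers _ _
  unfold Spec_is_continue_hash is_continue_hash is_continue_hash_alt
  set l := numbers.filter (fun n => !(n == 0)) with hl
  have hkeys := aLoop_keys numbers PySem.Dict.empty (by simp [PySem.Dict.keys_empty])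
  rw [PySem.Dict.keys_empty] at hkeys
  simp only [List.nil_append] at hkeys
  have hperm : (PySem.List.sorted l (fun x => x)).Perm l := PySem.List.sorted_perm l _ _
  have hpair : (PySem.List.sorted l (fun x => x)).Pairwise (· ≤ ·) := by
    simpa using PySem.List.sorted_pairwise l (fun x => x)
  by_cases hnd : l.Nodup
  · -- no duplicate nonzero card: both sides compare the span of the same set of cards
    rw [if_pos hnd] at hkeys
    obtain ⟨cards, hcards, hck⟩ : ∃ c, aLoop numbers PySem.Dict.empty = some c ∧ c.keys = l := by
      cases hal : aLoop numbers PySem.Dict.empty with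
      | none => rw [hal] at hkeys; simp at hkeys
      | some c => rw [hal] at hkeys; exact ⟨c, rfl, by simpa using hkeys⟩
    have hadj : bAdjDup (PySem.List.sorted l (fun x => x)) = false :=
      (bAdjDup_false_iff _ hpair).mpr (hperm.nodup_iff.mpr hnd)
    rw [hcards]
    simp only [hadj, Bool.false_eq_true, if_false, hck]
    rw [max?_eq_of_perm l _ hperm.symm, min?_eq_of_perm l _ hperm.symm]
    cases PySem.List.max? (PySem.List.sorted l (fun x => x)) (fun x => x) with
    | none => rfl
    | some mx =>
      cases PySem.List.min? (PySem.List.sorted l (fun x => x)) (fun x => x) with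
      | none => rfl
      | some mn => by_cases h : mx - mn ≤ 4 <;> simp [h]
  · -- a duplicate nonzero card: A's loop returns False early, B's adjacent scan finds it
    rw [if_neg hnd] at hkeys
    have hal : aLoop numbers PySem.Dict.empty = none := by
      cases h : aLoop numbers PySem.Dict.empty with
      | none => rfl
      | some c => rw [h] at hkeys; simp at hkeys
    have hadj : bAdjDup (PySem.List.sorted l (fun x => x)) = true := by
      cases h : bAdjDup (PySem.List.sorted l (fun x => x)) with
      | true => rfl
      | false => exact absurd (hperm.nodup_iff.mp ((bAdjDup_false_iff _ hpair).mp h)) hnd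
    rw [hal]
    simp [hadj]
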